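-- pv_equiv track=rewrite | github.com/pypi-data/pypi-mirror-382 | packages/kstprocess/kstprocess-0.3.17-py3-none-any.whl/kstprocess/dialog/postprocess.py | process_inquiry
-- ===== SOURCE A (Python) =====
-- def process_inquiry(text):
--     sentences = text.split('?')
--     question_count = len(sentences) - 1
--     if question_count <= 2:
--         return text
--     result_sentences = []
--     for i in range(2):
--         result_sentences.append(sentences[i].strip() + '?')
--     return ' '.join(result_sentences)
-- ===== SOURCE B (Python) =====
-- def process_inquiry(text):
--     if text.count('?') <= 2:
--         return text
--     first = text.index('?')
--     second = text.index('?', first + 1)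
--     return text[:first].strip() + '? ' + text[first + 1:second].strip() + '?'
-- ===== Notes on version B (the rewrite author's own statement) =====
-- stated objective: alternative
-- what changed: Instead of splitting the whole text into the list of '?'-separated pieces and rebuilding/joining the first two, B counts the delimiter once and, only when truncation is needed, locates the first two delimiter positions with index() and assembles the result from three slices.
import Mathlib
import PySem

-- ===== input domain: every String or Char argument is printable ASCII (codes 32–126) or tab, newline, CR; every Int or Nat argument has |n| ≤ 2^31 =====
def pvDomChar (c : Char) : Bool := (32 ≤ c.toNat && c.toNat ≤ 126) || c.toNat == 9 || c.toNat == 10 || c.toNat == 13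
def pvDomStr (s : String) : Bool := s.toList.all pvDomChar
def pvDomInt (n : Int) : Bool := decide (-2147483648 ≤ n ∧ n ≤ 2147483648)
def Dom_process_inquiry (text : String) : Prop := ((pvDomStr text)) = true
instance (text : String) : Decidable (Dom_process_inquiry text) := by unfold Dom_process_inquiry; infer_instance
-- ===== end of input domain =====

-- B replaces A's split-the-whole-text / rebuild-and-join pipeline by a count plus the first two
-- delimiter positions and three slices; objective: alternative decomposition (same asymptotic cost).

-- ===== PORT A =====
-- A, ported on the char-list side (PySem.Chars); text.split('?') with the nonempty literal
-- separator is exactly PySem.Chars.splitOn.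
def process_inquiry (text : String) : String :=
  let sentences := PySem.Chars.splitOn text.toList ['?']
  let question_count : Int := (sentences.length : Int) - 1
  if question_count ≤ 2 then text
  else
    let result_sentences := (PySem.List.pyRange 0 2 1).foldl
      (fun acc i => acc ++ [PySem.Chars.strip (PySem.List.pyGetD sentences i []) ++ ['?']])
      ([] : List (List Char))
    String.ofList (PySem.Chars.join [' '] result_sentences)

-- ===== PORT B =====
-- B from Source B; text.index('?') is ported as PySem.Chars.find (exact here: on this branch
-- count > 2 guarantees '?' occurs, so index() returns and equals find), and
-- text.index('?', first+1) as PySem.Chars.findFrom.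
def process_inquiry_alt (text : String) : String :=
  let cs := text.toList
  if PySem.Chars.count cs ['?'] ≤ 2 then text
  else
    let first := PySem.Chars.find cs ['?']
    let second := PySem.Chars.findFrom cs ['?'] (first + 1)
    String.ofList (PySem.Chars.strip (PySem.Chars.slice cs none (some first)) ++ ['?', ' '] ++
      PySem.Chars.strip (PySem.Chars.slice cs (some (first + 1)) (some second)) ++ ['?'])

-- ===== PRECONDITION & SPEC =====
def Spec_process_inquiry (text : String) (out : String) : Prop := out = process_inquiry_alt text
instance (text : String) (out : String) : Decidable (Spec_process_inquiry text out) := by unfold Spec_process_inquiry; infer_instance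

-- ===== CLAIM (what is proved, stated in full; the proofs are below) =====
def Claim_equal_process_inquiry : Prop := ∀ (text : String), Dom_process_inquiry text → Spec_process_inquiry text (process_inquiry text)

-- ===== LEMMAS AND PROOFS =====

theorem splitOn_go_eq (fuel : Nat) : ∀ (l cur : List Char) (acc : List (List Char)),
    l.length ≤ fuel →
    PySem.Chars.splitOn.go ['?'] fuel l cur acc =
      acc.reverse ++ (List.splitOnP (· == '?') l).modifyHead (cur.reverse ++ ·) := by
  induction fuel with
  | zero =>
    intro l cur acc hl
    have hnil : l = [] := by cases l <;> simp_all
    subst hnil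
    simp [PySem.Chars.splitOn.go, List.splitOnP_nil]
  | succ n ih =>
    intro l cur acc hl
    cases l with
    | nil => simp [PySem.Chars.splitOn.go, List.splitOnP_nil]
    | cons c t =>
      by_cases hc : c = '?'
      · subst hc
        have h1 : PySem.Chars.splitOn.go ['?'] (n+1) ('?'::t) cur acc
            = PySem.Chars.splitOn.go ['?'] n t [] (cur.reverse :: acc) := by
          simp [PySem.Chars.splitOn.go, List.isPrefixOf]
        rw [h1, ih t [] (cur.reverse :: acc) (by simp at hl; omega), List.splitOnP_cons]
        cases h2 : List.splitOnP (· == '?') t <;> simp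
      · have hc' : ¬ ('?' = c) := fun e => hc e.symm
        have h1 : PySem.Chars.splitOn.go ['?'] (n+1) (c::t) cur acc
            = PySem.Chars.splitOn.go ['?'] n t (c :: cur) acc := by
          simp [PySem.Chars.splitOn.go, List.isPrefixOf, hc']
        rw [h1, ih t (c :: cur) acc (by simp at hl; omega), List.splitOnP_cons]
        cases h2 : List.splitOnP (· == '?') t <;> simp [hc]

theorem chars_splitOn_eq (cs : List Char) :
    PySem.Chars.splitOn cs ['?'] = List.splitOnP (· == '?') cs := by
  unfold PySem.Chars.splitOn
  rw [splitOn_go_eq (cs.length + 1) cs [] [] (by omega)]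
  cases h2 : List.splitOnP (· == '?') cs <;> simp

theorem count_go_eq (fuel : Nat) : ∀ (l : List Char) (acc : Nat),
    l.length ≤ fuel →
    PySem.Chars.count.go ['?'] fuel l acc = acc + l.count '?' := by
  induction fuel with
  | zero =>
    intro l acc hl
    have hnil : l = [] := by cases l <;> simp_all
    subst hnil
    simp [PySem.Chars.count.go]
  | succ n ih =>
    intro l acc hl
    cases l with
    | nil => simp [PySem.Chars.count.go]
    | cons c t =>
      by_cases hc : c = '?'
      · subst hc
        have h1 : PySem.Chars.count.go ['?'] (n+1) ('?'::t) acc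
            = PySem.Chars.count.go ['?'] n t (acc + 1) := by
          simp [PySem.Chars.count.go, List.isPrefixOf]
        rw [h1, ih t (acc + 1) (by simp at hl; omega)]
        simp
        omega
      · have hc' : ¬ ('?' = c) := fun e => hc e.symm
        have h1 : PySem.Chars.count.go ['?'] (n+1) (c::t) acc
            = PySem.Chars.count.go ['?'] n t acc := by
          simp [PySem.Chars.count.go, List.isPrefixOf, hc']
        rw [h1, ih t acc (by simp at hl; omega)]
        simp [hc]

theorem chars_count_eq (cs : List Char) :
    PySem.Chars.count cs ['?'] = cs.count '?' := by
  have h1 : PySem.Chars.count cs ['?'] = PySem.Chars.count.go ['?'] cs.length cs 0 := by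
    simp [PySem.Chars.count]
  rw [h1, count_go_eq cs.length cs 0 le_rfl]
  omega

theorem length_splitOnP (l : List Char) :
    (List.splitOnP (· == '?') l).length = l.count '?' + 1 := by
  induction l with
  | nil => simp [List.splitOnP_nil]
  | cons c t ih =>
    rw [List.splitOnP_cons]
    by_cases hc : c = '?' <;> simp [hc, ih]

theorem splitOnP_first (p : List Char) : ∀ (r : List Char), '?' ∉ p →
    List.splitOnP (· == '?') (p ++ '?' :: r) = p :: List.splitOnP (· == '?') r := by
  induction p with
  | nil => intro r _; simp [List.splitOnP_cons]
  | cons a q ih =>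
    intro r hp
    have ha : ¬ a = '?' := fun e => hp (by simp [e])
    have hq : '?' ∉ q := fun m => hp (List.mem_cons_of_mem _ m)
    rw [List.cons_append, List.splitOnP_cons, ih r hq]
    simp [ha]

theorem find_go_first (p : List Char) : ∀ (r : List Char) (k : Nat), '?' ∉ p →
    PySem.Chars.find.go ['?'] (p ++ '?' :: r) k = (k : Int) + p.length := by
  induction p with
  | nil =>
    intro r k _
    simp [PySem.Chars.find.go, List.isPrefixOf]
  | cons a q ih =>
    intro r k hp
    have ha : ¬ a = '?' := fun e => hp (by simp [e])
    have hq : '?' ∉ q := fun m => hp (List.mem_cons_of_mem _ m)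
    have ha' : ¬ ('?' = a) := fun e => ha e.symm
    have h1 : PySem.Chars.find.go ['?'] ((a :: q) ++ '?' :: r) k
        = PySem.Chars.find.go ['?'] (q ++ '?' :: r) (k + 1) := by
      simp [PySem.Chars.find.go, List.isPrefixOf, ha']
    rw [h1, ih r (k + 1) hq]
    simp [List.length_cons]
    omega

theorem exists_split_first (c : Char) (l : List Char) (h : c ∈ l) :
    ∃ p r, l = p ++ c :: r ∧ c ∉ p := by
  induction l with
  | nil => cases h
  | cons a t ih =>
    by_cases hac : a = c
    · exact ⟨[], t, by simp [hac], by simp⟩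
    · rcases ih ((List.mem_cons.mp h).resolve_left (fun e => hac e.symm)) with ⟨p, r, hl, hp⟩
      exact ⟨a :: p, r, by simp [hl], by simp [hp, Ne.symm hac]⟩

theorem join_pair (x y : List Char) :
    PySem.Chars.join [' '] [x, y] = x ++ ' ' :: y := by
  simp [PySem.Chars.join, List.intercalate]

-- ===== VERDICT (by name: the statement is the Claim_ definition above) =====
theorem process_inquiry_spec : Claim_equal_process_inquiry := by
  intro text _
  unfold Spec_process_inquiry process_inquiry process_inquiry_alt
  simp only [chars_splitOn_eq, chars_count_eq, length_splitOnP]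
  by_cases hc : text.toList.count '?' ≤ 2
  · rw [if_pos (by push_cast; omega), if_pos hc]
  · have h1 : '?' ∈ text.toList := List.count_pos_iff.mp (by omega)
    obtain ⟨p0, t0, hcs, hp0⟩ := exists_split_first '?' text.toList h1
    have hcnt0 : text.toList.count '?' = t0.count '?' + 1 := by
      rw [hcs]; simp [List.count_append, List.count_eq_zero.mpr hp0]
    have h2 : '?' ∈ t0 := List.count_pos_iff.mp (by omega)
    obtain ⟨p1, r, ht0, hp1⟩ := exists_split_first '?' t0 h2
    rw [ht0] at hcs
    rw [if_neg (by push_cast; omega), if_neg hc, hcs]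
    rw [splitOnP_first p0 (p1 ++ '?' :: r) hp0, splitOnP_first p1 r hp1]
    have hfind : PySem.Chars.find (p0 ++ '?' :: (p1 ++ '?' :: r)) ['?'] = (p0.length : Int) := by
      unfold PySem.Chars.find
      rw [find_go_first p0 (p1 ++ '?' :: r) 0 hp0]
      simp
    have hfind2 : PySem.Chars.find (p1 ++ '?' :: r) ['?'] = (p1.length : Int) := by
      unfold PySem.Chars.find
      rw [find_go_first p1 r 0 hp1]
      simp
    have hdrop : List.drop (p0.length + 1) (p0 ++ '?' :: (p1 ++ '?' :: r)) = p1 ++ '?' :: r := by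
      rw [show p0 ++ '?' :: (p1 ++ '?' :: r) = (p0 ++ ['?']) ++ (p1 ++ '?' :: r) by simp,
        show p0.length + 1 = (p0 ++ ['?']).length by simp]
      exact List.drop_left
    have hff : PySem.Chars.findFrom (p0 ++ '?' :: (p1 ++ '?' :: r)) ['?'] ((p0.length : Int) + 1)
        = ((p0.length + 1 + p1.length : Nat) : Int) := by
      rw [show ((p0.length : Int) + 1) = ((p0.length + 1 : Nat) : Int) by push_cast; ring]
      rw [PySem.Chars.findFrom_natCast _ _ (p0.length + 1) (by simp)]
      rw [hdrop, hfind2, if_neg (by omega)]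
      push_cast
      ring
    rw [hfind, hff]
    have hsl1 : PySem.Chars.slice (p0 ++ '?' :: (p1 ++ '?' :: r)) none (some (p0.length : Int)) = p0 := by
      simp only [PySem.Chars.slice_eq_listSlice]
      rw [PySem.List.slice_to _ (by positivity)]
      simp
    have hsl2 : PySem.Chars.slice (p0 ++ '?' :: (p1 ++ '?' :: r)) (some ((p0.length : Int) + 1))
        (some ((p0.length + 1 + p1.length : Nat) : Int)) = p1 := by
      rw [show ((p0.length : Int) + 1) = ((p0.length + 1 : Nat) : Int) by push_cast; ring]
      simp only [PySem.Chars.slice_eq_listSlice]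
      rw [PySem.List.slice_natCast, hdrop]
      simp
    rw [hsl1, hsl2]
    rw [show PySem.List.pyRange 0 2 1 = [0, 1] from by decide]
    simp only [List.foldl_cons, List.foldl_nil, List.nil_append, PySem.List.pyGetD_ofNat',
      List.getD_cons_zero, List.getD_cons_succ]
    simp only [List.singleton_append]
    rw [join_pair]
    congr 1
    simp
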